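-- pv_equiv track=rewrite | github.com/alexandraback/datacollection | solutions_5639104758808576_1/Python/chmd/main.py | solve_instance
-- ===== SOURCE A (Python) =====
-- def solve_instance(s):
--     p = 0 # people clapping
--     f = 0 # friends
--
--     # for all shynesses
--     for i in range(len(s)):
--         # if necessary, add friends for people to clap
--         if p + f < i:
--             f += i - (p + f)
--         # add the people to the clapping audience
--         p += s[i]
--
--     return f
-- ===== SOURCE B (Python) =====
-- def solve_instance(s):
--     # Phase 1: build the full prefix-sum table (prefix[i] = sum of s[0..i-1]).
--     prefix = [0]
--     for x in s:
--         prefix.append(prefix[-1] + x)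
--     # Phase 2: the answer is max(0, max over i of i - prefix[i]).
--     best = 0
--     for i in range(len(s)):
--         best = max(best, i - prefix[i])
--     return best
-- ===== Notes on version B (the rewrite author's own statement) =====
-- stated objective: alternative
-- what changed: Replaces A's fused single-accumulator bump-up loop (tracking clapping people p and friends f together) with two separate phases: first materialize the full prefix-sum table, then a plain max-reduction best = max(0, max_i (i - prefix[i])).
import Mathlib
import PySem

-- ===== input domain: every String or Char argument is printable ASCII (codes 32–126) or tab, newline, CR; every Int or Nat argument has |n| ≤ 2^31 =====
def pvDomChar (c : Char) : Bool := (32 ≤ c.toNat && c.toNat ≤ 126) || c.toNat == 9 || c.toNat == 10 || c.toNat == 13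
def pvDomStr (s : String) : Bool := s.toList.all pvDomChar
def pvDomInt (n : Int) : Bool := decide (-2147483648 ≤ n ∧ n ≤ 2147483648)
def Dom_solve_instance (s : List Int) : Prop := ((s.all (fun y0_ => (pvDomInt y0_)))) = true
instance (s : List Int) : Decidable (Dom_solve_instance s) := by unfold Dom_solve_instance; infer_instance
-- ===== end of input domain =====

-- B splits A's fused accumulator loop into a prefix-sum table pass plus a separate max reduction (objective: alternative decomposition, same O(n) cost).

-- ===== PORT A =====
-- A's loop over i in range(len(s)) with state (p, f), as structural recursion carrying the index.
def goA : List Int → Nat → Int → Int → Int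
  | [], _, _, f => f
  | x :: xs, i, p, f =>
      let f' := if p + f < (i : Int) then f + ((i : Int) - (p + f)) else f
      goA xs (i + 1) (p + x) f'

def solve_instance (s : List Int) : Int := goA s 0 0 0

-- ===== PORT B =====
-- Phase 1 of Source B: the prefix-sum table (prefix[0] = acc, prefix[k+1] = prefix[k] + s[k]).
def scanSums : Int → List Int → List Int
  | acc, [] => [acc]
  | acc, x :: xs => acc :: scanSums (acc + x) xs

-- Phase 2 of Source B: best = max(best, i - prefix[i]) over i in range(len(s)).
def reduceBest : Nat → Int → List Int → Int
  | _, best, [] => best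
  | i, best, q :: qs => reduceBest (i + 1) (max best ((i : Int) - q)) qs

def solve_instance_alt (s : List Int) : Int :=
  reduceBest 0 0 ((scanSums 0 s).take s.length)

-- ===== PRECONDITION & SPEC =====
def Spec_solve_instance (s : List Int) (out : Int) : Prop := out = solve_instance_alt s
instance (s : List Int) (out : Int) : Decidable (Spec_solve_instance s out) := by unfold Spec_solve_instance; infer_instance

-- ===== CLAIM (what is proved, stated in full; the proofs are below) =====
def Claim_equal_solve_instance : Prop := ∀ (s : List Int), Dom_solve_instance s → Spec_solve_instance s (solve_instance s)

-- ===== LEMMAS AND PROOFS =====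
theorem goA_eq_reduceBest (s : List Int) : ∀ (i : Nat) (p f : Int),
    goA s i p f = reduceBest i f ((scanSums p s).take s.length) := by
  induction s with
  | nil => intro i p f; simp [goA, scanSums, reduceBest]
  | cons x xs ih =>
      intro i p f
      simp only [goA, scanSums, List.length_cons, List.take_succ_cons, reduceBest]
      rw [ih]
      congr 1
      split <;> omega

-- ===== VERDICT (by name: the statement is the Claim_ definition above) =====
theorem solve_instance_spec : Claim_equal_solve_instance := by
  intro s _
  unfold Spec_solve_instance solve_instance solve_instance_alt
  exact goA_eq_reduceBest s 0 0 0
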